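-- pv_equiv track=rewrite | github.com/Artyrie/Algorithms | Ect/hash_lv2_phone_number.py | solution7
-- ===== SOURCE A (Python) =====
-- from collections import Counter
--
-- def solution7(phone_book):
--     # 91.7점 t18 5.63ms
--     tmp = sorted(phone_book, key=lambda val: len(val))
--     min_len = len(tmp[0])
--     max_len = len(tmp[-1])
--     for i in range(min_len, max_len):
--         tmp = [val[:i] for val in phone_book]
--         tmp = sorted(Counter(tmp).items(), reverse=True,
--                     key=lambda x: x[1])
--         if tmp[0][1] > 1:
--             return False
--     return True
-- ===== SOURCE B (Python) =====
-- def solution7(phone_book):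
--     min_len = min(len(p) for p in phone_book)
--     prefixes = {p[:min_len] for p in phone_book}
--     return len(prefixes) == len(phone_book)
-- ===== Notes on version B (the rewrite author's own statement) =====
-- stated objective: simpler
-- what changed: A loops over every prefix length from min to max, rebuilding a Counter and sorting its items each time; B performs a single duplicate check on the min_len-prefixes via a set-cardinality comparison (a collision at any longer length is already a collision at min_len), with no per-length loop and no sorting.
-- intended difference: On lists where every number has the same length and some number occurs more than once, A returns True because its loop range(min_len, max_len) is empty, while B returns False; a duplicated number is a prefix collision, so False is the intended value. — e.g. on solution7(["1", "1"]): A returns true, B returns false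
import Mathlib
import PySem

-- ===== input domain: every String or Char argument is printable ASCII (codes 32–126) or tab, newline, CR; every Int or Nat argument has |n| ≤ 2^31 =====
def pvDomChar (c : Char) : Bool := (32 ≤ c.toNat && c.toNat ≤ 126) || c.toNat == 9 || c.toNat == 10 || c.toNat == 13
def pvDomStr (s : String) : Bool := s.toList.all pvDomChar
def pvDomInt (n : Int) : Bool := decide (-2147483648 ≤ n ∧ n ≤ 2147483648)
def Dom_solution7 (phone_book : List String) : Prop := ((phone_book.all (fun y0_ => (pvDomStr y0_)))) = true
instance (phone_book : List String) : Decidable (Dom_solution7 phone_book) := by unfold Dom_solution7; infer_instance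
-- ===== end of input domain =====

-- B replaces A's per-prefix-length Counter-and-sort loop by a single set-cardinality
-- duplicate check on the min_len-prefixes; on equal-length lists with a duplicated entry
-- A returns True and B returns False (stated as the intended difference D_ below).

-- ===== PORT A =====
-- the body of A's for-loop: prefixes of length i, Counter, sort items by count descending, test top count > 1
def pvDupCheck (phone_book : List String) (i : Int) : Bool :=
  let tmp := phone_book.map (fun val => PySem.Str.slice val none (some i))
  let tmp2 := PySem.List.sorted (PySem.Dict.counter tmp).items (fun x => x.2) (reverse := true)
  match PySem.List.pyGet? tmp2 0 with
  | some p => decide (1 < p.2)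
  | none => false   -- Python raises IndexError here; unreachable for phone_book ≠ []

-- the for-loop with its early return False
def pvLoopA (phone_book : List String) : List Int → Bool
  | [] => true
  | i :: rest => if pvDupCheck phone_book i then false else pvLoopA phone_book rest

def solution7 (phone_book : List String) : Bool :=
  let tmp := PySem.List.sorted phone_book (fun val => PySem.Str.len val)
  match PySem.List.pyGet? tmp 0, PySem.List.pyGet? tmp (-1) with
  | some t0, some tl =>
      let min_len := PySem.Str.len t0
      let max_len := PySem.Str.len tl
      pvLoopA phone_book (PySem.List.pyRange min_len max_len 1)
  | _, _ => true   -- Python raises IndexError on []; excluded by Pre_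

-- ===== PORT B =====
def solution7_alt (phone_book : List String) : Bool :=
  match PySem.List.min? (phone_book.map PySem.Str.len) (fun x => x) with
  | none => true   -- Python min() raises ValueError on []; excluded by Pre_
  | some min_len =>
    let prefixes := PySem.Set.ofList (phone_book.map (fun p => PySem.Str.slice p none (some min_len)))
    PySem.Set.len prefixes == (phone_book.length : Int)

-- ===== PRECONDITION & SPEC =====
-- A raises IndexError (and B's min() ValueError) on the empty list; Pre_ excludes exactly that input.
def Pre_solution7 (phone_book : List String) : Prop := phone_book ≠ []
instance (phone_book : List String) : Decidable (Pre_solution7 phone_book) := by unfold Pre_solution7; infer_instance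
def pvWitness_solution7 : List String := ["119", "97674223", "1195524421"]

-- On lists where every number has the same length and some number occurs more than once,
-- A returns True (its loop range(min_len, max_len) is empty), B returns False;
-- a duplicated number is a prefix collision, so False is the intended value.
def D_solution7 (phone_book : List String) : Prop :=
  (phone_book.all (fun p => PySem.Str.len p == PySem.Str.len (phone_book.headD ""))) = true
    ∧ ¬ phone_book.Nodup
instance (phone_book : List String) : Decidable (D_solution7 phone_book) := by unfold D_solution7; infer_instance

def Spec_solution7 (phone_book : List String) (out : Bool) : Prop := ¬ D_solution7 phone_book → out = solution7_alt phone_book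
instance (phone_book : List String) (out : Bool) : Decidable (Spec_solution7 phone_book out) := by unfold Spec_solution7; infer_instance

def pvDiffWitness_solution7 : List String := ["1", "1"]
def pvDiffWitnessOut_solution7 : Bool × Bool := (true, false)

-- ===== CLAIM (what is proved, stated in full; the proofs are below) =====
def Claim_unchanged_solution7 : Prop := ∀ (phone_book : List String), Dom_solution7 phone_book → Pre_solution7 phone_book → Spec_solution7 phone_book (solution7 phone_book)
def Claim_changed_solution7 : Prop := Dom_solution7 (pvDiffWitness_solution7) ∧ Pre_solution7 (pvDiffWitness_solution7) ∧ D_solution7 (pvDiffWitness_solution7) ∧ solution7 (pvDiffWitness_solution7) = pvDiffWitnessOut_solution7.1 ∧ solution7_alt (pvDiffWitness_solution7) = pvDiffWitnessOut_solution7.2 ∧ pvDiffWitnessOut_solution7.1 ≠ pvDiffWitnessOut_solution7.2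
def Claim_exact_solution7 : Prop := ∀ (phone_book : List String), Dom_solution7 phone_book → Pre_solution7 phone_book → D_solution7 phone_book → solution7 phone_book ≠ solution7_alt phone_book

-- ===== LEMMAS AND PROOFS =====

-- taking a shorter prefix of a prefix is taking the shorter prefix directly
theorem pv_slice_slice (p : String) {j i : Int} (h0 : 0 ≤ j) (hji : j ≤ i) :
    PySem.Str.slice (PySem.Str.slice p none (some i)) none (some j) = PySem.Str.slice p none (some j) := by
  apply String.toList_inj.mp
  simp only [PySem.Str.toList_slice, PySem.Chars.slice_eq_listSlice]
  rw [PySem.List.slice_to (xs := p.toList) (le_trans h0 hji),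
      PySem.List.slice_to (xs := List.take i.toNat p.toList) h0,
      PySem.List.slice_to (xs := p.toList) h0, List.take_take]
  congr 1
  omega

-- the length-(len p) prefix of p is p itself
theorem pv_slice_full (p : String) {m : Int} (h : PySem.Str.len p = m) :
    PySem.Str.slice p none (some m) = p := by
  apply String.toList_inj.mp
  simp only [PySem.Str.toList_slice, PySem.Chars.slice_eq_listSlice]
  have hm : m = (p.toList.length : Int) := by rw [← h, PySem.Str.len_eq]
  rw [PySem.List.slice_to (xs := p.toList) (by omega), hm]
  simp

-- a duplicate among length-i prefixes forces a duplicate among length-j prefixes, j ≤ i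
theorem pv_dup_mono (pb : List String) {j i : Int} (h0 : 0 ≤ j) (hji : j ≤ i)
    (h : ¬ (pb.map (fun p => PySem.Str.slice p none (some i))).Nodup) :
    ¬ (pb.map (fun p => PySem.Str.slice p none (some j))).Nodup := by
  intro hn
  apply h
  have hmap : pb.map (fun p => PySem.Str.slice p none (some j))
      = (pb.map (fun p => PySem.Str.slice p none (some i))).map
          (fun q => PySem.Str.slice q none (some j)) := by
    rw [List.map_map]
    exact List.map_congr_left (fun p _ => (pv_slice_slice p h0 hji).symm)
  rw [hmap] at hn
  exact hn.of_map

-- A's loop body tests exactly: the length-i prefixes contain a duplicate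
theorem pv_dupCheck_iff (pb : List String) (i : Int) (hpb : pb ≠ []) :
    pvDupCheck pb i = true ↔ ¬ (pb.map (fun p => PySem.Str.slice p none (some i))).Nodup := by
  simp only [pvDupCheck]
  set tmp := pb.map (fun p => PySem.Str.slice p none (some i)) with htmp
  have htne : tmp ≠ [] := by simpa [htmp] using hpb
  have hitems : (PySem.Dict.counter tmp).items
      = (PySem.Set.ofList tmp).map (fun k => (k, (tmp.count k : Int))) :=
    PySem.Dict.items_counter tmp
  have hine : (PySem.Dict.counter tmp).items ≠ [] := by
    obtain ⟨x, hx⟩ := List.exists_mem_of_ne_nil tmp htne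
    have : (x, (tmp.count x : Int)) ∈ (PySem.Dict.counter tmp).items := by
      rw [hitems]
      exact List.mem_map_of_mem ((PySem.Set.mem_ofList tmp x).mpr hx)
    exact List.ne_nil_of_mem this
  rcases hs : PySem.List.sorted (PySem.Dict.counter tmp).items (fun x => x.2) true with _ | ⟨p, t⟩
  · exact absurd ((PySem.List.sorted_eq_nil_iff _ _ _).mp hs) hine
  · have hget : PySem.List.pyGet? (p :: t) 0 = some p := by
      simp [PySem.List.pyGet?, PySem.List.pyIdx?]
    rw [hget]
    simp only [decide_eq_true_eq]
    constructor
    · intro hp hnd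
      have hpm : p ∈ (PySem.Dict.counter tmp).items := by
        rw [← PySem.List.mem_sorted (PySem.Dict.counter tmp).items (fun x => x.2) true, hs]
        exact List.mem_cons_self
      rw [hitems] at hpm
      obtain ⟨k, hk, hkp⟩ := List.mem_map.mp hpm
      have hcle := List.nodup_iff_count_le_one.mp hnd k
      subst hkp
      simp only at hp
      omega
    · intro hnd
      rw [List.nodup_iff_count_le_one] at hnd
      push Not at hnd
      obtain ⟨k, hk⟩ := hnd
      have hkm : k ∈ tmp := by
        by_contra hkn
        rw [List.count_eq_zero_of_not_mem hkn] at hk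
        omega
      have hkitem : (k, (tmp.count k : Int)) ∈ (PySem.Dict.counter tmp).items := by
        rw [hitems]
        exact List.mem_map_of_mem ((PySem.Set.mem_ofList tmp k).mpr hkm)
      have hle := PySem.List.key_head_sorted_rev_ge (PySem.Dict.counter tmp).items
        (fun x => x.2) hs _ hkitem
      simp only at hle
      omega

-- the loop returns True when no iteration fires
theorem pv_loop_true (pb : List String) (l : List Int)
    (h : ∀ i ∈ l, pvDupCheck pb i = false) : pvLoopA pb l = true := by
  induction l with
  | nil => rfl
  | cons i rest ih =>
      simp only [pvLoopA, h i List.mem_cons_self, if_false, Bool.false_eq_true]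
      exact ih (fun j hj => h j (List.mem_cons_of_mem _ hj))

-- set cardinality equals list length exactly when the list has no duplicates
theorem pv_setlen_iff {l : List String} :
    (PySem.Set.ofList l).length = l.length ↔ l.Nodup := by
  constructor
  · intro h
    have hperm : (PySem.Set.ofList l).Perm l.dedup := by
      rw [List.perm_ext_iff_of_nodup (PySem.Set.nodup_ofList l) l.nodup_dedup]
      intro a
      rw [PySem.Set.mem_ofList, List.mem_dedup]
    have hlen : l.dedup.length = l.length := by rw [← hperm.length_eq, h]
    have : l.dedup = l := l.dedup_sublist.eq_of_length hlen
    rw [← this]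
    exact l.nodup_dedup
  · intro h
    rw [PySem.Set.ofList_eq_self_of_nodup l h]

-- B, evaluated: when min? = some m, B returns True iff the min_len-prefixes have no duplicate
theorem pv_alt_eq (pb : List String) (m : Int)
    (hmin : PySem.List.min? (pb.map PySem.Str.len) (fun x => x) = some m) :
    solution7_alt pb = decide (pb.map (fun p => PySem.Str.slice p none (some m))).Nodup := by
  simp only [solution7_alt, hmin]
  set lpre := pb.map (fun p => PySem.Str.slice p none (some m)) with hlpre
  have hlenpre : lpre.length = pb.length := by rw [hlpre, List.length_map]
  have hsetlen : PySem.Set.len (PySem.Set.ofList lpre) = ((PySem.Set.ofList lpre).length : Int) := rfl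
  by_cases hdup : lpre.Nodup
  · have : (PySem.Set.ofList lpre).length = pb.length := by
      rw [pv_setlen_iff.mpr hdup, hlenpre]
    simp [this, hdup]
  · have hne : (PySem.Set.ofList lpre).length ≠ pb.length := fun hc =>
      hdup (pv_setlen_iff.mp (by rw [hc, hlenpre]))
    have : (PySem.Set.len (PySem.Set.ofList lpre) == (pb.length : Int)) = false := by
      rw [hsetlen]
      simpa using fun hc => hne (by exact_mod_cast hc)
    simp [hdup]
    exact hne

-- the shared skeleton: for nonempty pb, A's min/max lengths and B's min agree,
-- giving everything both verdict theorems need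
theorem pv_main (pb : List String) (hpre : pb ≠ []) :
    ∃ m M : Int, PySem.List.min? (pb.map PySem.Str.len) (fun x => x) = some m ∧
      (∀ y ∈ pb, m ≤ PySem.Str.len y) ∧ (∀ y ∈ pb, PySem.Str.len y ≤ M) ∧
      (∃ y ∈ pb, PySem.Str.len y = M) ∧ m ≤ M ∧ 0 ≤ m ∧
      solution7 pb = pvLoopA pb (PySem.List.pyRange m M 1) := by
  simp only [solution7]
  have hsne : PySem.List.sorted pb (fun val => PySem.Str.len val) ≠ [] := by
    rw [Ne, PySem.List.sorted_eq_nil_iff]; exact hpre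
  rcases hs : PySem.List.sorted pb (fun val => PySem.Str.len val) with _ | ⟨t0, tt⟩
  · exact absurd hs hsne
  have hmne : pb.map PySem.Str.len ≠ [] := by simpa using hpre
  rcases hmin : PySem.List.min? (pb.map PySem.Str.len) (fun x => x) with _ | m
  · exact absurd ((PySem.List.min?_eq_none_iff _ _).mp hmin) hmne
  have hget0 : PySem.List.pyGet? (t0 :: tt) (0 : Int) = some t0 := by
    simp [PySem.List.pyGet?, PySem.List.pyIdx?]
  have hgetm1 : PySem.List.pyGet? (t0 :: tt) (-1 : Int)
      = some ((t0 :: tt).getLast (by simp)) := by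
    simp only [PySem.List.pyGet?, PySem.List.pyIdx?]
    have h1 : 1 ≤ (t0 :: tt).length := by simp
    simp only [Int.reduceNeg]
    norm_num
    rw [List.getLast_eq_getElem]
    simp
    rfl
  rw [hget0, hgetm1]
  set tl := (t0 :: tt).getLast (by simp) with htl
  have ht0pb : t0 ∈ pb := by
    rw [← PySem.List.mem_sorted pb (fun val => PySem.Str.len val) false, hs]
    exact List.mem_cons_self
  have ht0min : ∀ y ∈ pb, PySem.Str.len t0 ≤ PySem.Str.len y :=
    PySem.List.key_head_sorted_le pb (fun val => PySem.Str.len val) hs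
  have hmmin : ∀ y ∈ pb.map PySem.Str.len, m ≤ y := by
    intro y hy; exact PySem.List.min?_isMin hmin y hy
  have hmeq : m = PySem.Str.len t0 := by
    obtain ⟨y, hy, hym⟩ := List.mem_map.mp (PySem.List.min?_mem hmin)
    have h1 := ht0min y hy
    have h2 := hmmin (PySem.Str.len t0) (List.mem_map_of_mem ht0pb)
    omega
  have htlmax : ∀ y ∈ pb, PySem.Str.len y ≤ PySem.Str.len tl := by
    intro y hy
    have hy' : y ∈ t0 :: tt := by
      rw [← hs, PySem.List.mem_sorted]; exact hy
    obtain ⟨q, hq, hyq⟩ := List.mem_iff_getElem.mp hy'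
    have hq' : q < (PySem.List.sorted pb (fun val => PySem.Str.len val)).length := by
      rw [hs]; exact hq
    have hmono := PySem.List.key_sorted_getElem_mono pb (fun val => PySem.Str.len val)
      (p := q) (q := (PySem.List.sorted pb (fun val => PySem.Str.len val)).length - 1)
      (by omega) (by rw [hs] at hq' ⊢; omega)
    simp only [hs] at hmono
    rw [hyq] at hmono
    rw [← List.getLast_eq_getElem] at hmono
    all_goals first
      | (rw [← htl] at hmono; exact hmono)
      | simp
  have htlpb : tl ∈ pb := by
    rw [htl, ← PySem.List.mem_sorted pb (fun v => PySem.Str.len v) false, hs]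
    exact List.getLast_mem _
  refine ⟨m, PySem.Str.len tl, rfl, ?_, htlmax, ⟨tl, htlpb, rfl⟩, ?_, ?_, ?_⟩
  · intro y hy; exact hmmin _ (List.mem_map_of_mem hy)
  · rw [hmeq]; exact ht0min tl htlpb
  · rw [hmeq, PySem.Str.len_eq]; exact Int.natCast_nonneg _
  · rw [hmeq]

-- ===== VERDICT (by name: the statements are the Claim_ definitions above) =====
theorem solution7_spec : Claim_unchanged_solution7 := by
  intro pb _ hpre hnd
  obtain ⟨m, M, hmin, hlo, hhi, _, hmM, hm0, hA⟩ := pv_main pb hpre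
  rw [hA, pv_alt_eq pb m hmin]
  set lpre := pb.map (fun p => PySem.Str.slice p none (some m)) with hlpre
  by_cases hcase : m = M
  · -- all lengths equal; ¬D forces Nodup, both sides are True
    subst hcase
    rw [PySem.List.pyRange_one_eq_nil (le_refl m)]
    have hall : ∀ p ∈ pb, PySem.Str.len p = m := fun p hp =>
      le_antisymm (hhi p hp) (hlo p hp)
    have hnodup : pb.Nodup := by
      by_contra hcon
      apply hnd
      constructor
      · rcases pb with _ | ⟨h, t⟩
        · exact absurd rfl hpre
        · simp only [List.all_eq_true, beq_iff_eq]
          intro p hp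
          rw [hall p hp, List.headD_cons, hall h List.mem_cons_self]
      · exact hcon
    have hmapid : lpre = pb := by
      rw [hlpre]
      exact (List.map_congr_left (fun p hp => pv_slice_full p (hall p hp))).trans (List.map_id _)
    simp [pvLoopA, hmapid, hnodup]
  · have hlt : m < M := lt_of_le_of_ne hmM hcase
    by_cases hdup : lpre.Nodup
    · have hfirst : pvDupCheck pb m = false := by
        rw [← Bool.not_eq_true, pv_dupCheck_iff pb m hpre]
        simpa [hlpre] using hdup
      have hrest : pvLoopA pb (PySem.List.pyRange (m + 1) M) = true := by
        apply pv_loop_true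
        intro i hi
        rw [PySem.List.mem_pyRange_one] at hi
        rw [← Bool.not_eq_true, pv_dupCheck_iff pb i hpre]
        intro hcon
        exact (pv_dup_mono pb hm0 (by omega) hcon) (by simpa [hlpre] using hdup)
      rw [PySem.List.pyRange_one_cons hlt, pvLoopA, hfirst]
      simp only [Bool.false_eq_true, if_false]
      rw [hrest]
      simp [hdup]
    · have hfirst : pvDupCheck pb m = true := by
        rw [pv_dupCheck_iff pb m hpre]; simpa [hlpre] using hdup
      rw [PySem.List.pyRange_one_cons hlt, pvLoopA, hfirst, if_pos rfl]
      simp [hdup]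

theorem solution7_changed : Claim_changed_solution7 := by
  unfold Claim_changed_solution7; decide

theorem solution7_tight : Claim_exact_solution7 := by
  intro pb _ hpre hD
  obtain ⟨hall, hdup⟩ := hD
  obtain ⟨m, M, hmin, hlo, hhi, hMmem, hmM, hm0, hA⟩ := pv_main pb hpre
  rcases hpb : pb with _ | ⟨h, t⟩
  · exact absurd hpb hpre
  subst hpb
  simp only [List.all_eq_true, beq_iff_eq, List.headD_cons] at hall
  have hallm : ∀ p ∈ h :: t, PySem.Str.len p = m := by
    have hhm : PySem.Str.len h = m := by
      have h1 := hlo h List.mem_cons_self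
      obtain ⟨y, hy, hym⟩ := List.mem_map.mp (PySem.List.min?_mem hmin)
      rw [hall y hy] at hym
      omega
    intro p hp
    rw [hall p hp, hhm]
  have hMm : M = m := by
    obtain ⟨y, hy, hyM⟩ := hMmem
    rw [hallm y hy] at hyM
    omega
  rw [hA, hMm, PySem.List.pyRange_one_eq_nil (le_refl m),
      pv_alt_eq _ m hmin]
  have hmapid : (h :: t).map (fun p => PySem.Str.slice p none (some m)) = h :: t :=
    (List.map_congr_left (fun p hp => pv_slice_full p (hallm p hp))).trans (List.map_id _)
  rw [hmapid]
  simp [pvLoopA, hdup]
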